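-- pv_equiv track=rewrite | github.com/butteredwaffles/8380-project | suffix_tree.py | get_mods
-- ===== SOURCE A (Python) =====
-- def get_mods(arr):
--     mods = []
--     two_mods = []
--     for i in range(len(arr) - 2):
--         if i % 3 == 1:
--             mods.append(i)
--         elif i % 3 == 2:
--             two_mods.append(i)
--     mods.extend(two_mods)
--     return mods
-- ===== SOURCE B (Python) =====
-- def get_mods(arr):
--     n = len(arr) - 2
--     return list(range(1, n, 3)) + list(range(2, n, 3))
-- ===== Notes on version B (the rewrite author's own statement) =====
-- stated objective: simpler
-- what changed: B replaces the per-index scan with its modulo test and two accumulator lists by directly generating the two arithmetic progressions range(1, n, 3) and range(2, n, 3) and concatenating them.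
import Mathlib
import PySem

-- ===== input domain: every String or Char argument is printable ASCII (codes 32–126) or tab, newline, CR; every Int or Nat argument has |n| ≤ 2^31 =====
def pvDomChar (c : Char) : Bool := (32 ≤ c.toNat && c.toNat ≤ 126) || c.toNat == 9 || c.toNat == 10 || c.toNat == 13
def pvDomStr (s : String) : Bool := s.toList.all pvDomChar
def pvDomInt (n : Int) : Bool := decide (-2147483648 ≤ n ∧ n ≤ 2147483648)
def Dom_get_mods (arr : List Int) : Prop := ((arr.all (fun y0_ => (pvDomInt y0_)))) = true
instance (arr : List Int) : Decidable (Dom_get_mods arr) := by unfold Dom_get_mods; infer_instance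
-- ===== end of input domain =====

-- B replaces A's scan of every index with a modulo test by directly generating the two
-- arithmetic progressions range(1, n, 3) and range(2, n, 3) and concatenating them (objective: simpler).

-- ===== PORT A =====
def get_mods (arr : List Int) : List Int :=
  let r := (PySem.List.pyRange 0 ((arr.length : Int) - 2) 1).foldl
    (fun p i =>
      if PySem.Int.mod i 3 = 1 then (p.1 ++ [i], p.2)
      else if PySem.Int.mod i 3 = 2 then (p.1, p.2 ++ [i])
      else p) (([] : List Int), ([] : List Int))
  r.1 ++ r.2

-- ===== PORT B =====
def get_mods_alt (arr : List Int) : List Int :=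
  PySem.List.pyRange 1 ((arr.length : Int) - 2) 3 ++ PySem.List.pyRange 2 ((arr.length : Int) - 2) 3

-- ===== PRECONDITION & SPEC =====
def Spec_get_mods (arr : List Int) (out : List Int) : Prop := out = get_mods_alt arr
instance (arr : List Int) (out : List Int) : Decidable (Spec_get_mods arr out) := by unfold Spec_get_mods; infer_instance

-- ===== CLAIM (what is proved, stated in full; the proofs are below) =====
def Claim_equal_get_mods : Prop := ∀ (arr : List Int), Dom_get_mods arr → Spec_get_mods arr (get_mods arr)

-- ===== LEMMAS AND PROOFS =====

-- range(1, m, 3) enumerated as a map over a plain range, for a natural bound m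
lemma pv_range1_eq (m : Nat) :
    PySem.List.pyRange 1 (m : Int) 3 = (List.range ((m+1)/3)).map (fun k => ((1 + 3*k : Nat) : Int)) := by
  rw [PySem.List.pyRange_of_pos _ _ (by norm_num : (0:Int) < 3)]
  have hc : (if (1:Int) < (m:Int) then (((m:Int) - 1 + 3 - 1)/3).toNat else 0) = (m+1)/3 := by
    split_ifs with h
    · omega
    · have hm : m ≤ 1 := by exact_mod_cast (by omega : (m:Int) ≤ 1)
      omega
  rw [hc]
  apply List.map_congr_left
  intro k _
  push_cast
  ring

-- range(2, m, 3) enumerated as a map over a plain range, for a natural bound m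
lemma pv_range2_eq (m : Nat) :
    PySem.List.pyRange 2 (m : Int) 3 = (List.range (m/3)).map (fun k => ((2 + 3*k : Nat) : Int)) := by
  rw [PySem.List.pyRange_of_pos _ _ (by norm_num : (0:Int) < 3)]
  have hc : (if (2:Int) < (m:Int) then (((m:Int) - 2 + 3 - 1)/3).toNat else 0) = m/3 := by
    split_ifs with h
    · omega
    · have hm : m ≤ 2 := by exact_mod_cast (by omega : (m:Int) ≤ 2)
      omega
  rw [hc]
  apply List.map_congr_left
  intro k _
  push_cast
  ring

-- invariant of A's loop: after scanning range(0, n), the accumulators hold the two stepped ranges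
lemma pv_key (n : Nat) :
    (PySem.List.pyRange 0 (n : Int) 1).foldl
      (fun p i =>
        if PySem.Int.mod i 3 = 1 then (p.1 ++ [i], p.2)
        else if PySem.Int.mod i 3 = 2 then (p.1, p.2 ++ [i])
        else p) (([] : List Int), ([] : List Int))
    = (PySem.List.pyRange 1 (n : Int) 3, PySem.List.pyRange 2 (n : Int) 3) := by
  induction n with
  | zero => decide
  | succ n ih =>
    have hstep : ((n+1 : Nat) : Int) = (n : Int) + 1 := by push_cast; ring
    rw [hstep, PySem.List.pyRange_one_succ_right (by positivity), List.foldl_append, ih]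
    simp only [List.foldl_cons, List.foldl_nil]
    have hmod : PySem.Int.mod (n : Int) 3 = ((n % 3 : Nat) : Int) := by
      exact_mod_cast PySem.Int.mod_natCast n 3
    rw [← hstep, pv_range1_eq, pv_range2_eq, pv_range1_eq, pv_range2_eq, hmod]
    rcases (by omega : n % 3 = 0 ∨ n % 3 = 1 ∨ n % 3 = 2) with h | h | h
    · have h1 : (n+1+1)/3 = (n+1)/3 := by omega
      have h2 : (n+1)/3 = n/3 := by omega
      rw [h]
      norm_num [h1, h2]
    · have h1 : (n+1+1)/3 = (n+1)/3 + 1 := by omega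
      have h2 : (n+1)/3 = n/3 := by omega
      rw [h]
      norm_num [h1, h2, List.range_succ]
      congr 1
      push_cast
      omega
    · have h1 : (n+1+1)/3 = (n+1)/3 := by omega
      have h2 : (n+1)/3 = n/3 + 1 := by omega
      rw [h]
      norm_num [h1, h2, List.range_succ]
      congr 1
      push_cast
      omega

-- ===== VERDICT (by name: the statement is the Claim_ definition above) =====
theorem get_mods_spec : Claim_equal_get_mods := by
  intro arr _
  unfold Spec_get_mods get_mods get_mods_alt
  by_cases h : 2 ≤ arr.length
  · have hcast : (arr.length : Int) - 2 = ((arr.length - 2 : Nat) : Int) := by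
      omega
    rw [hcast, pv_key]
  · have e0 : PySem.List.pyRange 0 ((arr.length : Int) - 2) 1 = [] :=
      PySem.List.pyRange_one_eq_nil (by omega)
    rw [e0]
    rw [PySem.List.pyRange_of_pos _ _ (by norm_num : (0:Int) < 3),
        PySem.List.pyRange_of_pos _ _ (by norm_num : (0:Int) < 3)]
    rw [if_neg (by omega), if_neg (by omega)]
    simp
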